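-- pv_equiv track=rewrite | github.com/piedro404/resolucoes-de-problemas | Uri/Ad-Hoc/Volta.py | voltas
-- ===== SOURCE A (Python) =====
-- def voltas(dados):
--     if dados[0] > dados[1]:
--         min = dados[1]
--         max = dados[0]
--     else:
--         min = dados[0]
--         max = dados[1]
--
--     i = 0
--     v = 0
--     while True:
--         if min*i <= (max*i)-max:
--             break
--         i+=1
--         v+=1
--
--     return v
-- ===== SOURCE B (Python) =====
-- def voltas(dados):
--     if dados[0] > dados[1]:
--         mx, mn = dados[0], dados[1]
--     else:
--         mx, mn = dados[1], dados[0]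
--     if mx <= 0:
--         return 0
--     return -(-mx // (mx - mn))
-- ===== Notes on version B (the rewrite author's own statement) =====
-- stated objective: alternative
-- what changed: replaces A's lap-counting loop (one iteration per lap, O(max/(max-min)) iterations) by the closed form ceil(max/(max-min)) computed with one floor division
import Mathlib
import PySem

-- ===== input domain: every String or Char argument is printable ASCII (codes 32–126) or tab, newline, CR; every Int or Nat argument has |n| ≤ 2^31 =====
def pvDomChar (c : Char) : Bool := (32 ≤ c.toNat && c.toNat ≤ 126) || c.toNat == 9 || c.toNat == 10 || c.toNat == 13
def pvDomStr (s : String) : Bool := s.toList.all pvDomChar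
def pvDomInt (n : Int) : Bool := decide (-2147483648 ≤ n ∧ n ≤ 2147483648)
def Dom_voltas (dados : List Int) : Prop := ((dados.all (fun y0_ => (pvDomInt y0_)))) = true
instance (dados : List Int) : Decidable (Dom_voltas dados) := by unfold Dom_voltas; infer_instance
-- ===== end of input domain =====

-- B replaces A's lap-counting loop by the closed form ceil(max/(max-min)) (one floor division instead of an iteration per lap).


-- ===== PORT A =====
-- A's 'while True' loop, fuel-bounded: on every input admitted by Pre_voltas the loop
-- breaks after at most max steps, and the fuel (max.toNat + 2) is never exhausted.
def voltasLoop (mn mx : Int) : Nat → Int → Int → Int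
  | 0, _, v => v
  | f + 1, i, v => if mn * i ≤ mx * i - mx then v else voltasLoop mn mx f (i + 1) (v + 1)

def voltas (dados : List Int) : Int :=
  match PySem.List.pyGet? dados 0, PySem.List.pyGet? dados 1 with
  | some d0, some d1 =>
    let mn := if d0 > d1 then d1 else d0
    let mx := if d0 > d1 then d0 else d1
    voltasLoop mn mx (mx.toNat + 2) 0 0
  | _, _ => 0  -- IndexError in Python; excluded by Pre_voltas

-- ===== PORT B =====
def voltas_alt (dados : List Int) : Int :=
  (((PySem.List.pyGet? dados 0).bind fun d0 =>
    (PySem.List.pyGet? dados 1).map fun d1 =>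
      let mn := if d0 > d1 then d1 else d0
      let mx := if d0 > d1 then d0 else d1
      if mx ≤ 0 then 0 else -(PySem.Int.floordiv (-mx) (mx - mn))) : Option Int).getD 0
      -- none = IndexError in Python; excluded by Pre_voltas

-- ===== PRECONDITION & SPEC =====
-- Pre_ excludes inputs with fewer than two elements (A raises IndexError) and inputs with
-- dados[0] = dados[1] > 0, on which A's loop never terminates (and B divides by zero).
def Pre_voltas (dados : List Int) : Prop :=
  2 ≤ dados.length ∧ ¬(dados[0]! = dados[1]! ∧ 0 < dados[0]!)
instance (dados : List Int) : Decidable (Pre_voltas dados) := by unfold Pre_voltas; infer_instance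
def pvWitness_voltas : List Int := [3, 10]

def Spec_voltas (dados : List Int) (out : Int) : Prop := out = voltas_alt dados
instance (dados : List Int) (out : Int) : Decidable (Spec_voltas dados out) := by unfold Spec_voltas; infer_instance

-- ===== CLAIM (what is proved, stated in full; the proofs are below) =====
def Claim_equal_voltas : Prop := ∀ (dados : List Int), Dom_voltas dados → Pre_voltas dados → Spec_voltas dados (voltas dados)

-- ===== LEMMAS AND PROOFS =====

-- Loop invariant: with enough fuel, starting at i ≤ N (N the break point), the loop adds N - i to v.
theorem voltasLoop_eq (mn mx N : Int) (hmn : mn < mx)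
    (hbrk : mx ≤ N * (mx - mn)) (hlt : ∀ j : Int, 0 ≤ j → j < N → ¬ mx ≤ j * (mx - mn)) :
    ∀ (f : Nat) (i v : Int), 0 ≤ i → i ≤ N → N - i < (f : Int) →
      voltasLoop mn mx f i v = v + (N - i) := by
  intro f
  induction f with
  | zero => intro i v h0 h1 h2; simp at h2; omega
  | succ f ih =>
    intro i v h0 h1 h2
    unfold voltasLoop
    by_cases hc : mn * i ≤ mx * i - mx
    · have hiN : N ≤ i := by
        by_contra hlt'
        exact hlt i h0 (by omega) (by nlinarith)
      simp [hc]; omega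
    · have hiN : i < N := by
        by_contra h
        have : mx ≤ i * (mx - mn) := by nlinarith
        exact hc (by nlinarith)
      simp [hc]
      rw [ih (i + 1) (v + 1) (by omega) (by omega) (by push_cast at h2 ⊢; omega)]
      ring

theorem voltas_spec' (dados : List Int) (hpre : Pre_voltas dados) :
    voltas dados = voltas_alt dados := by
  obtain ⟨hlen, hne⟩ := hpre
  match dados, hlen with
  | d0 :: d1 :: rest, _ =>
    simp at hne
    have hnn : (0:Int) ≤ (rest.length : Int) + 1 := by positivity
    have h0 : PySem.List.pyGet? (d0 :: d1 :: rest) 0 = some d0 := by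
      simp [PySem.List.pyGet?, PySem.List.pyIdx?, hnn]
    have h1 : PySem.List.pyGet? (d0 :: d1 :: rest) 1 = some d1 := by
      simp [PySem.List.pyGet?, PySem.List.pyIdx?, hnn]
    unfold voltas voltas_alt
    rw [h0, h1]
    simp only [Option.bind_some, Option.map_some, Option.getD_some]
    set mn : Int := if d0 > d1 then d1 else d0 with hmn
    set mx : Int := if d0 > d1 then d0 else d1 with hmx
    have hle : mn ≤ mx := by rw [hmn, hmx]; split <;> omega
    by_cases hpos : mx ≤ 0
    · -- loop breaks at i = 0
      have hz : voltasLoop mn mx (mx.toNat + 2) 0 0 = 0 := by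
        unfold voltasLoop; simp; omega
      rw [hz, if_pos hpos]
    · rw [not_le] at hpos
      have hlt : mn < mx := by
        rcases eq_or_lt_of_le hle with h | h
        · exfalso
          rw [hmn, hmx] at h
          split at h <;> omega
        · exact h
      -- N = ceil(mx / (mx - mn)); the break-point characterisation comes from the PySem ceiling lemma
      set N : Int := -(PySem.Int.floordiv (-mx) (mx - mn)) with hNdef
      have hd : (0:Int) < mx - mn := by omega
      have hNch : (N - 1) * (mx - mn) < mx ∧ mx ≤ N * (mx - mn) :=
        (PySem.Int.neg_floordiv_neg_eq_iff_of_pos hd).mp rfl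
      have hN1 : 1 ≤ N := by nlinarith [hNch.1, hNch.2]
      have hNmx : N ≤ mx := by nlinarith [hNch.1]
      have hfuel : N - 0 < ((mx.toNat + 2 : Nat) : Int) := by
        push_cast; omega
      rw [voltasLoop_eq mn mx N hlt hNch.2
          (fun j hj0 hjN hc => by nlinarith [hNch.1]) (mx.toNat + 2) 0 0 le_rfl (by omega) hfuel]
      rw [if_neg (by omega)]
      omega

-- ===== VERDICT (by name: the statement is the Claim_ definition above) =====
theorem voltas_spec : Claim_equal_voltas := by
  intro dados _ hpre
  exact voltas_spec' dados hpre
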